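-- pv_equiv track=rewrite | github.com/migueangel1228/University | ADA/hw01/cat.py | binaryS
-- ===== SOURCE A (Python) =====
-- from math import log2
--
-- def binaryS(h, w):
--     N = -1
--     i = -1
--     # caso base
--     if h == 1 and w == 1:
--         N = 0
--         i = 0
--
--     max_i = int(log2(h)) + 1 # cota segura para i
--     for iAux in range(1, max_i + 1):
--         l, r = 1, w  # N^i = w => N <= w (para N>=1)
--
--         noEncontrado = True # si sirve el i
--         while l <= r and noEncontrado:
--             mid = (l + r) // 2
--             value = pow(mid + 1, iAux)
--
--             if value == h:
--                 if pow(mid, iAux) == w: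
--                     N = mid; i = iAux
--                 noEncontrado = False  # Encontrado
--
--             elif value < h:
--                 l = mid + 1
--             else:
--                 r = mid - 1
--     return N, i
-- ===== SOURCE B (Python) =====
-- def binaryS(h, w):
--     # Factor-based search: instead of a binary search per exponent, enumerate
--     # candidate bases b = N+1 up to isqrt(h) and compute the exponent directly.
--     if h == 1 and w == 1:
--         return (0, 0)
--     N, i = -1, -1
--     # exponent 1: (N+1)^1 = h and N^1 = w with 1 <= N
--     if w >= 1 and h - 1 == w:
--         N, i = w, 1
--     b = 2
--     while b * b <= h:
--         p, e = b * b, 2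
--         while p < h:
--             p *= b
--             e += 1
--         if p == h and 1 <= b - 1 <= w and (b - 1) ** e == w and e > i:
--             N, i = b - 1, e
--         b += 1
--     return (N, i)
-- ===== Notes on version B (the rewrite author's own statement) =====
-- stated objective: alternative
-- what changed: Instead of a binary search over N for each exponent i up to log2(h), B enumerates candidate bases b=N+1 up to sqrt(h), computes each base's exponent by repeated multiplication, and keeps the valid pair with the largest exponent (exponent 1 handled directly).
-- outside the precondition, e.g. on binaryS(0, 5): A raises ValueError, B returns (-1, -1)
-- crash fix: On h <= 0 A raises ValueError (math.log2 domain error) while B returns -1 for both components. — e.g. on binaryS(0, 5): A raises ValueError, B returns (-1, -1)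
import Mathlib
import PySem

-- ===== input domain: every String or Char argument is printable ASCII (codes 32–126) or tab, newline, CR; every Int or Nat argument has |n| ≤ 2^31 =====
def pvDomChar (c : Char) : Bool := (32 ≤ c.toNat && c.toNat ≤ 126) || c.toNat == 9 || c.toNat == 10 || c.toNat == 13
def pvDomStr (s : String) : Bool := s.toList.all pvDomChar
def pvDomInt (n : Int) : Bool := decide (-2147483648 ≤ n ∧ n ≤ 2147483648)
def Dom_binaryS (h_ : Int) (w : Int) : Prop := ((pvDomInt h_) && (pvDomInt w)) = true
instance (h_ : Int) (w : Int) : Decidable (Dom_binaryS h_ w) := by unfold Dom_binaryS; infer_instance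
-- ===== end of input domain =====

-- B replaces A's per-exponent binary search by enumerating candidate bases up to √h
-- with the exponent computed by repeated multiplication (alternative algorithm, not faster).


-- ===== PORT A =====

-- pow(b, e) with a nonnegative int exponent (every exponent used below is ≥ 1)
def pyPow (b e : Int) : Int := b ^ e.toNat

-- int(log2(h)) for 1 ≤ h ≤ 2^31: math.log2 is exact enough on this range that
-- int(log2(h)) = floor(log2 h) = Nat.log 2 h (verified over the whole Dom range of h).
def intLog2 (h_ : Int) : Int := (Nat.log 2 h_.toNat : Int)

-- termination facts for the loops, cited by name in `decreasing_by`
theorem pvMidDecL {l r : Int} (hlr : l ≤ r) :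
    (r - (PySem.Int.floordiv (l + r) 2 + 1) + 1).toNat < (r - l + 1).toNat := by
  have := PySem.Int.floordiv_two_mid_bounds hlr; omega

theorem pvMidDecR {l r : Int} (hlr : l ≤ r) :
    (PySem.Int.floordiv (l + r) 2 - 1 - l + 1).toNat < (r - l + 1).toNat := by
  have := PySem.Int.floordiv_two_mid_bounds hlr; omega

theorem pvOneLeMul {p b : Int} (hb : 2 ≤ b) (hp : 1 ≤ p) : 1 ≤ p * b := by nlinarith

theorem pvPowDec {h_ b p : Int} (hb : 2 ≤ b) (hp : 1 ≤ p) (hlt : p < h_) :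
    (h_ - p * b).toNat < (h_ - p).toNat := by
  have : p + 1 ≤ p * b := by nlinarith
  omega

theorem pvOneLeSq {b : Int} (hb : 2 ≤ b) : 1 ≤ b * b := by nlinarith

theorem pvTwoLeSucc {b : Int} (hb : 2 ≤ b) : 2 ≤ b + 1 := by omega

theorem pvBaseDec {h_ b : Int} (hb : 2 ≤ b) (hbb : b * b ≤ h_) :
    (h_ - (b + 1)).toNat < (h_ - b).toNat := by
  have : b + 1 ≤ b * b := by nlinarith
  omega

-- the inner `while l <= r and noEncontrado` loop; returning early when value == h
-- is exact because that branch clears noEncontrado without touching l, r.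
def bsLoop (h_ w iAux : Int) (l r N i : Int) : Int × Int :=
  if hlr : l ≤ r then
    let mid := PySem.Int.floordiv (l + r) 2
    let value := pyPow (mid + 1) iAux
    if value = h_ then
      if pyPow mid iAux = w then (mid, iAux) else (N, i)
    else if value < h_ then bsLoop h_ w iAux (mid + 1) r N i
    else bsLoop h_ w iAux l (mid - 1) N i
  else (N, i)
termination_by (r - l + 1).toNat
decreasing_by
  · exact pvMidDecL hlr
  · exact pvMidDecR hlr

def binaryS (h_ : Int) (w : Int) : Int × Int :=
  let s0 : Int × Int := if h_ = 1 ∧ w = 1 then (0, 0) else (-1, -1)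
  let max_i : Int := intLog2 h_ + 1
  (PySem.List.pyRange 1 (max_i + 1) 1).foldl
    (fun s iAux => bsLoop h_ w iAux 1 w s.1 s.2) s0

-- ===== PORT B =====

-- inner `while p < h: p *= b; e += 1` (proof arguments only make the loop total)
def altPowLoop (h_ b : Int) (hb : 2 ≤ b) (p e : Int) (hp : 1 ≤ p) : Int × Int :=
  if hlt : p < h_ then
    altPowLoop h_ b hb (p * b) (e + 1) (pvOneLeMul hb hp)
  else (p, e)
termination_by (h_ - p).toNat
decreasing_by exact pvPowDec hb hp hlt

-- outer `while b * b <= h` loop over candidate bases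
def altLoop (h_ w : Int) (b : Int) (hb : 2 ≤ b) (N i : Int) : Int × Int :=
  if hbb : b * b ≤ h_ then
    let pe := altPowLoop h_ b hb (b * b) 2 (pvOneLeSq hb)
    let s' : Int × Int :=
      if pe.1 = h_ ∧ 1 ≤ b - 1 ∧ b - 1 ≤ w ∧ pyPow (b - 1) pe.2 = w ∧ i < pe.2
      then (b - 1, pe.2) else (N, i)
    altLoop h_ w (b + 1) (pvTwoLeSucc hb) s'.1 s'.2
  else (N, i)
termination_by (h_ - b).toNat
decreasing_by exact pvBaseDec hb hbb

def binaryS_alt (h_ : Int) (w : Int) : Int × Int :=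
  if h_ = 1 ∧ w = 1 then (0, 0)
  else
    let s0 : Int × Int := if 1 ≤ w ∧ h_ - 1 = w then (w, 1) else (-1, -1)
    altLoop h_ w 2 (le_refl 2) s0.1 s0.2

-- ===== PRECONDITION & SPEC =====
-- Pre_ excludes exactly h ≤ 0, where math.log2 raises ValueError in A.
def Pre_binaryS (h_ : Int) (w : Int) : Prop := 1 ≤ h_
instance (h_ : Int) (w : Int) : Decidable (Pre_binaryS h_ w) := by unfold Pre_binaryS; infer_instance
def pvWitness_binaryS : Int × Int := (8, 1)

-- On h ≤ 0 A raises ValueError (math.log2 domain error) while B returns -1 for both components.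
def Raises_binaryS (h_ : Int) (w : Int) : Prop := h_ ≤ 0
instance (h_ : Int) (w : Int) : Decidable (Raises_binaryS h_ w) := by unfold Raises_binaryS; infer_instance
def pvRaiseWitness_binaryS : Int × Int := (0, 5)
def pvRaiseWitnessOut_binaryS : Int × Int := (-1, -1)

def Spec_binaryS (h_ : Int) (w : Int) (out : Int × Int) : Prop := out = binaryS_alt h_ w
instance (h_ : Int) (w : Int) (out : Int × Int) : Decidable (Spec_binaryS h_ w out) := by unfold Spec_binaryS; infer_instance

-- ===== CLAIM (what is proved, stated in full; the proofs are below) =====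
def Claim_equal_binaryS : Prop := ∀ (h_ : Int) (w : Int), Dom_binaryS h_ w → Pre_binaryS h_ w → Spec_binaryS h_ w (binaryS h_ w)
def Claim_raises_binaryS : Prop := (∀ (h_ : Int) (w : Int), Dom_binaryS h_ w → Raises_binaryS h_ w → ¬ Pre_binaryS h_ w) ∧ (Dom_binaryS (pvRaiseWitness_binaryS.1) (pvRaiseWitness_binaryS.2) ∧ Raises_binaryS (pvRaiseWitness_binaryS.1) (pvRaiseWitness_binaryS.2) ∧ binaryS_alt (pvRaiseWitness_binaryS.1) (pvRaiseWitness_binaryS.2) = pvRaiseWitnessOut_binaryS)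

-- ===== LEMMAS AND PROOFS =====

-- a valid solution pair: N ≥ 1, N ≤ w, (N+1)^e = h, N^e = w  (exponent e ≥ 1)
def Good (h_ w N e : Int) : Prop :=
  1 ≤ e ∧ 1 ≤ N ∧ N ≤ w ∧ pyPow (N + 1) e = h_ ∧ pyPow N e = w

-- what both programs compute: the Good pair of maximal exponent, else the initial value
def Best (h_ w : Int) (out : Int × Int) : Prop :=
  (Good h_ w out.1 out.2 ∧ ∀ N e, Good h_ w N e → e ≤ out.2) ∨
  ((∀ N e, ¬ Good h_ w N e) ∧ out = (if h_ = 1 ∧ w = 1 then ((0:Int), (0:Int)) else (-1, -1)))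

theorem pyPow_lt_pyPow {a b e : Int} (ha : 0 ≤ a) (hab : a < b) (he : 1 ≤ e) :
    pyPow a e < pyPow b e := by
  unfold pyPow
  have hn : e.toNat ≠ 0 := by omega
  exact pow_lt_pow_left₀ hab ha hn

theorem pyPow_le_pyPow {a b e : Int} (ha : 0 ≤ a) (hab : a ≤ b) :
    pyPow a e ≤ pyPow b e := by
  unfold pyPow
  exact pow_le_pow_left₀ ha hab _

theorem pyPow_base_inj {a b e : Int} (ha : 0 ≤ a) (hb : 0 ≤ b) (he : 1 ≤ e)
    (h : pyPow a e = pyPow b e) : a = b := by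
  rcases lt_trichotomy a b with hlt | heq | hgt
  · exact absurd h (ne_of_lt (pyPow_lt_pyPow ha hlt he))
  · exact heq
  · exact absurd h.symm (ne_of_lt (pyPow_lt_pyPow hb hgt he))

theorem good_base_unique {h_ w N N' e : Int} (h1 : Good h_ w N e) (h2 : Good h_ w N' e) : N = N' := by
  obtain ⟨he, hN, _, hh, _⟩ := h1
  obtain ⟨_, hN', _, hh', _⟩ := h2
  have := pyPow_base_inj (a := N + 1) (b := N' + 1) (e := e) (by omega) (by omega) he
    (by rw [hh, hh'])
  omega

theorem good_exp_unique {h_ w N N' e e' : Int} (h1 : Good h_ w N e) (h2 : Good h_ w N' e') :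
    e ≤ e' → e' ≤ e → N = N' ∧ e = e' := by
  intro hle hge
  have heq : e = e' := le_antisymm hle hge
  subst heq
  exact ⟨good_base_unique h1 h2, rfl⟩

theorem best_unique {h_ w : Int} {o o' : Int × Int} (h1 : Best h_ w o) (h2 : Best h_ w o') : o = o' := by
  rcases h1 with ⟨hg, hmax⟩ | ⟨hno, he⟩
  · rcases h2 with ⟨hg', hmax'⟩ | ⟨hno', _⟩
    · obtain ⟨hN, hE⟩ := good_exp_unique hg hg' (hmax' _ _ hg) (hmax _ _ hg')
      exact Prod.ext hN hE
    · exact absurd hg (hno' _ _)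
  · rcases h2 with ⟨hg', _⟩ | ⟨_, he'⟩
    · exact absurd hg' (hno _ _)
    · rw [he, he']

-- ===== A side =====

-- no hit in [l, r]: the binary search leaves the state untouched
theorem bsLoop_none {h_ w iAux : Int} {N i : Int} {l r : Int}
    (hnone : ∀ m, l ≤ m → m ≤ r → pyPow (m + 1) iAux ≠ h_) :
    bsLoop h_ w iAux l r N i = (N, i) := by
  revert hnone
  induction l, r using bsLoop.induct h_ w iAux with
  | case1 l r hlr mid value hv hw =>
    intro hnone
    exact absurd hv (hnone _ (PySem.Int.floordiv_two_mid_bounds hlr).1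
      (PySem.Int.floordiv_two_mid_bounds hlr).2)
  | case2 l r hlr mid value hv hw =>
    intro hnone
    exact absurd hv (hnone _ (PySem.Int.floordiv_two_mid_bounds hlr).1
      (PySem.Int.floordiv_two_mid_bounds hlr).2)
  | case3 l r hlr mid value hv hlt ih =>
    intro hnone
    rw [bsLoop, dif_pos hlr, if_neg hv, if_pos hlt]
    exact ih fun m h1 h2 =>
      hnone m (by have := PySem.Int.floordiv_two_mid_bounds hlr; omega) h2
  | case4 l r hlr mid value hv hlt ih =>
    intro hnone
    rw [bsLoop, dif_pos hlr, if_neg hv, if_neg hlt]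
    exact ih fun m h1 h2 =>
      hnone m h1 (by have := PySem.Int.floordiv_two_mid_bounds hlr; omega)
  | case5 l r hlr =>
    intro _
    rw [bsLoop, dif_neg hlr]

-- a hit m in [l, r] (l ≥ 0): the search finds exactly m
theorem bsLoop_found {h_ w iAux : Int} {N i m : Int} {l r : Int} (he : 1 ≤ iAux)
    (hm : pyPow (m + 1) iAux = h_) :
    0 ≤ l → l ≤ m → m ≤ r →
    bsLoop h_ w iAux l r N i = (if pyPow m iAux = w then (m, iAux) else (N, i)) := by
  induction l, r using bsLoop.induct h_ w iAux with
  | case1 l r hlr mid value hv hw =>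
    intro hl hm1 hm2
    have hb := PySem.Int.floordiv_two_mid_bounds hlr
    have hv' : pyPow (PySem.Int.floordiv (l + r) 2 + 1) iAux = h_ := hv
    have hw' : pyPow (PySem.Int.floordiv (l + r) 2) iAux = w := hw
    have hmeq : PySem.Int.floordiv (l + r) 2 = m := by
      have := pyPow_base_inj (a := PySem.Int.floordiv (l + r) 2 + 1) (b := m + 1)
        (e := iAux) (by omega) (by omega) he (by rw [hv', hm])
      omega
    rw [bsLoop, dif_pos hlr, if_pos hv', hmeq]
  | case2 l r hlr mid value hv hw =>
    intro hl hm1 hm2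
    have hb := PySem.Int.floordiv_two_mid_bounds hlr
    have hv' : pyPow (PySem.Int.floordiv (l + r) 2 + 1) iAux = h_ := hv
    have hw' : ¬ pyPow (PySem.Int.floordiv (l + r) 2) iAux = w := hw
    have hmeq : PySem.Int.floordiv (l + r) 2 = m := by
      have := pyPow_base_inj (a := PySem.Int.floordiv (l + r) 2 + 1) (b := m + 1)
        (e := iAux) (by omega) (by omega) he (by rw [hv', hm])
      omega
    rw [bsLoop, dif_pos hlr, if_pos hv', hmeq]
  | case3 l r hlr mid value hv hlt ih =>
    intro hl hm1 hm2
    have hb := PySem.Int.floordiv_two_mid_bounds hlr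
    have hv' : ¬ pyPow (PySem.Int.floordiv (l + r) 2 + 1) iAux = h_ := hv
    have hlt' : pyPow (PySem.Int.floordiv (l + r) 2 + 1) iAux < h_ := hlt
    have hmm : PySem.Int.floordiv (l + r) 2 + 1 ≤ m := by
      by_contra hcon
      have : pyPow (m + 1) iAux ≤ pyPow (PySem.Int.floordiv (l + r) 2 + 1) iAux :=
        pyPow_le_pyPow (by omega) (by omega)
      rw [hm] at this; omega
    rw [bsLoop, dif_pos hlr, if_neg hv', if_pos hlt']
    exact ih (by omega) hmm hm2
  | case4 l r hlr mid value hv hlt ih =>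
    intro hl hm1 hm2
    have hb := PySem.Int.floordiv_two_mid_bounds hlr
    have hv' : ¬ pyPow (PySem.Int.floordiv (l + r) 2 + 1) iAux = h_ := hv
    have hlt' : ¬ pyPow (PySem.Int.floordiv (l + r) 2 + 1) iAux < h_ := hlt
    have hmm : m ≤ PySem.Int.floordiv (l + r) 2 - 1 := by
      by_contra hcon
      have : pyPow (PySem.Int.floordiv (l + r) 2 + 1) iAux ≤ pyPow (m + 1) iAux :=
        pyPow_le_pyPow (by omega) (by omega)
      rw [hm] at this; omega
    rw [bsLoop, dif_pos hlr, if_neg hv', if_neg hlt']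
    exact ih hl hm1 hmm
  | case5 l r hlr =>
    intro hl hm1 hm2
    omega

-- single outer iteration of A
theorem stepA_spec (h_ w iAux : Int) (he : 1 ≤ iAux) (s : Int × Int) :
    (∃ N, Good h_ w N iAux ∧ bsLoop h_ w iAux 1 w s.1 s.2 = (N, iAux)) ∨
    ((∀ N, ¬ Good h_ w N iAux) ∧ bsLoop h_ w iAux 1 w s.1 s.2 = s) := by
  by_cases hex : ∃ m, 1 ≤ m ∧ m ≤ w ∧ pyPow (m + 1) iAux = h_
  · obtain ⟨m, hm1, hm2, hmp⟩ := hex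
    have hres := bsLoop_found (w := w) (N := s.1) (i := s.2) he hmp (by norm_num) hm1 hm2
    by_cases hw : pyPow m iAux = w
    · left
      exact ⟨m, ⟨he, hm1, hm2, hmp, hw⟩, by rw [hres, if_pos hw]⟩
    · right
      constructor
      · intro N hg
        obtain ⟨_, hN1, hN2, hNp, hNw⟩ := hg
        have : N = m := pyPow_base_inj (a := N + 1) (b := m + 1) (e := iAux)
          (by omega) (by omega) he (by rw [hNp, hmp]) |> fun h => by omega
        exact hw (this ▸ hNw)
      · rw [hres, if_neg hw]
  · right
    constructor
    · intro N hg
      obtain ⟨_, hN1, hN2, hNp, _⟩ := hg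
      exact hex ⟨N, hN1, hN2, hNp⟩
    · have : ∀ m, (1:Int) ≤ m → m ≤ w → pyPow (m + 1) iAux ≠ h_ := by
        intro m h1 h2 hp
        exact hex ⟨m, h1, h2, hp⟩
      rw [bsLoop_none this]

-- A's fold invariant, by induction on the number of processed exponents
theorem foldA_spec (h_ w : Int) (k : Nat) (s0 : Int × Int) :
    (∃ N e, Good h_ w N e ∧ 1 ≤ e ∧ e ≤ (k : Int) ∧
        (PySem.List.pyRange 1 ((k : Int) + 1) 1).foldl
          (fun s iAux => bsLoop h_ w iAux 1 w s.1 s.2) s0 = (N, e) ∧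
        (∀ N' e', Good h_ w N' e' → e' ≤ (k : Int) → e' ≤ e)) ∨
    ((∀ N e, Good h_ w N e → ¬ e ≤ (k : Int)) ∧
        (PySem.List.pyRange 1 ((k : Int) + 1) 1).foldl
          (fun s iAux => bsLoop h_ w iAux 1 w s.1 s.2) s0 = s0) := by
  induction k with
  | zero =>
    right
    constructor
    · intro N e hg
      have := hg.1
      omega
    · rw [PySem.List.pyRange_one_eq_nil (by norm_num)]
      rfl
  | succ k ih =>
    have hsplit : PySem.List.pyRange 1 (((k : Int) + 1) + 1) 1 =
        PySem.List.pyRange 1 ((k : Int) + 1) 1 ++ [(k : Int) + 1] :=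
      PySem.List.pyRange_one_succ_right (by omega)
    have hcast : ((k + 1 : Nat) : Int) = (k : Int) + 1 := by push_cast; ring
    rw [hcast, hsplit, List.foldl_append]
    set mid := (PySem.List.pyRange 1 ((k : Int) + 1) 1).foldl
      (fun s iAux => bsLoop h_ w iAux 1 w s.1 s.2) s0 with hmid
    simp only [List.foldl_cons, List.foldl_nil]
    have hstep := stepA_spec h_ w ((k : Int) + 1) (by omega) mid
    rcases ih with ⟨N, e, hg, he1, hek, hres, hmax⟩ | ⟨hnone, hres⟩
    · rcases hstep with ⟨N1, hg1, hstep1⟩ | ⟨hno1, hstep1⟩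
      · left
        refine ⟨N1, (k : Int) + 1, hg1, by omega, by omega, hstep1, ?_⟩
        intro N' e' hg' he'
        omega
      · left
        rw [hstep1, hres]
        refine ⟨N, e, hg, he1, by omega, rfl, ?_⟩
        intro N' e' hg' he'
        by_cases hcase : e' ≤ (k : Int)
        · exact hmax N' e' hg' hcase
        · have : e' = (k : Int) + 1 := by omega
          exact absurd hg' (this ▸ hno1 N')
    · rcases hstep with ⟨N1, hg1, hstep1⟩ | ⟨hno1, hstep1⟩
      · left
        refine ⟨N1, (k : Int) + 1, hg1, by omega, by omega, hstep1, ?_⟩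
        intro N' e' hg' he'
        by_cases hcase : e' ≤ (k : Int)
        · exact absurd hcase (hnone N' e' hg')
        · omega
      · right
        rw [hstep1, hres]
        refine ⟨?_, rfl⟩
        intro N' e' hg' hle
        by_cases hcase : e' ≤ (k : Int)
        · exact hnone N' e' hg' hcase
        · have : e' = (k : Int) + 1 := by omega
          exact absurd hg' (this ▸ hno1 N')

theorem good_exp_le_log {h_ w N e : Int} (hg : Good h_ w N e) : e ≤ intLog2 h_ + 1 := by
  obtain ⟨he, hN1, _, hp, _⟩ := hg
  have h2 : pyPow 2 e ≤ h_ := by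
    rw [← hp]
    exact pyPow_le_pyPow (by norm_num) (by omega)
  have hpow : (0:Int) < pyPow 2 e := by unfold pyPow; positivity
  have hcast : ((2 ^ e.toNat : Nat) : Int) = pyPow 2 e := by unfold pyPow; push_cast; rfl
  have hnat : 2 ^ e.toNat ≤ h_.toNat := by omega
  have hlog : e.toNat ≤ Nat.log 2 h_.toNat :=
    (Nat.le_log_iff_pow_le (by norm_num) (by omega)).mpr hnat
  unfold intLog2
  omega

theorem binaryS_best (h_ w : Int) (hpre : 1 ≤ h_) : Best h_ w (binaryS h_ w) := by
  have hlognn : 0 ≤ intLog2 h_ := by unfold intLog2; positivity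
  have hk : (((intLog2 h_ + 1).toNat : Nat) : Int) = intLog2 h_ + 1 := by omega
  have hcover : ∀ N e, Good h_ w N e → e ≤ (((intLog2 h_ + 1).toNat : Nat) : Int) := by
    intro N e hg
    rw [hk]
    exact good_exp_le_log hg
  show Best h_ w ((PySem.List.pyRange 1 ((intLog2 h_ + 1) + 1) 1).foldl
    (fun s iAux => bsLoop h_ w iAux 1 w s.1 s.2)
    (if h_ = 1 ∧ w = 1 then ((0:Int), (0:Int)) else (-1, -1)))
  rw [show intLog2 h_ + 1 + 1 = (((intLog2 h_ + 1).toNat : Nat) : Int) + 1 by omega]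
  rcases foldA_spec h_ w (intLog2 h_ + 1).toNat
      (if h_ = 1 ∧ w = 1 then ((0:Int), (0:Int)) else (-1, -1)) with
    ⟨N, e, hg, he1, hek, hres, hmax⟩ | ⟨hnone, hres⟩
  · left
    rw [hres]
    exact ⟨hg, fun N' e' hg' => hmax N' e' hg' (hcover N' e' hg')⟩
  · right
    rw [hres]
    exact ⟨fun N' e' hg' => absurd (hcover N' e' hg') (hnone N' e' hg'), rfl⟩

-- ===== B side =====

-- exponent monotonicity helpers
theorem pyPow_exp_le {b e e' : Int} (hb : 1 ≤ b) (he : 0 ≤ e) (hee : e ≤ e') :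
    pyPow b e ≤ pyPow b e' := by
  unfold pyPow
  exact pow_le_pow_right₀ hb (by omega)

theorem pyPow_exp_lt {b e e' : Int} (hb : 2 ≤ b) (he : 0 ≤ e) (hee : e < e') :
    pyPow b e < pyPow b e' := by
  unfold pyPow
  exact pow_lt_pow_right₀ (by omega) (by omega)

-- the power loop computes the least e' ≥ e with b^e' ≥ h (state p = b^e throughout)
theorem altPowLoop_spec (h_ b : Int) (hb : 2 ≤ b) :
    ∀ (p e : Int) (hp : 1 ≤ p), 0 ≤ e → p = pyPow b e →
    ∃ e', e ≤ e' ∧ altPowLoop h_ b hb p e hp = (pyPow b e', e') ∧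
      h_ ≤ pyPow b e' ∧ (∀ e'', e ≤ e'' → e'' < e' → pyPow b e'' < h_) := by
  intro p e hp
  induction p, e, hp using altPowLoop.induct h_ b hb with
  | case1 p e hp hlt ih =>
    intro he hpe
    have hmul : p * b = pyPow b (e + 1) := by
      unfold pyPow at *
      rw [show (e + 1).toNat = e.toNat + 1 by omega, pow_succ, ← hpe]
    obtain ⟨e', he1, hres, hge, hmin⟩ := ih (by omega) hmul
    refine ⟨e', by omega, ?_, hge, ?_⟩
    · rw [altPowLoop, dif_pos hlt]
      exact hres
    · intro e'' h1 h2
      by_cases hc : e'' = e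
      · subst hc
        rw [← hpe]
        exact hlt
      · exact hmin e'' (by omega) h2
  | case2 p e hp hlt =>
    intro he hpe
    refine ⟨e, le_refl _, ?_, by rw [← hpe]; omega, by omega⟩
    rw [altPowLoop, dif_neg hlt, hpe]

-- B's outer loop returns the Good pair with base ≥ b of maximal exponent above i, else (N, i)
theorem altLoop_spec (h_ w : Int) :
    ∀ (b : Int) (hb : 2 ≤ b) (N i : Int),
    (∃ N' e, Good h_ w N' e ∧ 2 ≤ e ∧ b ≤ N' + 1 ∧ i < e ∧
        altLoop h_ w b hb N i = (N', e) ∧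
        (∀ N'' e'', Good h_ w N'' e'' → 2 ≤ e'' → b ≤ N'' + 1 → e'' ≤ e)) ∨
    ((∀ N' e, Good h_ w N' e → 2 ≤ e → b ≤ N' + 1 → e ≤ i) ∧
        altLoop h_ w b hb N i = (N, i)) := by
  intro b hb N i
  induction b, hb, N, i using altLoop.induct h_ w with
  | case1 b hb N i hbb pe s' ih =>
    obtain ⟨e', he2, hpe, hge, hmin⟩ :=
      altPowLoop_spec h_ b hb (b * b) 2 (by nlinarith) (by norm_num)
        (by unfold pyPow; rw [show (2:Int).toNat = 2 from rfl, pow_two])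
    have hpe' : pe = (pyPow b e', e') := hpe
    -- any exponent e2 ≥ 2 with b^e2 = h_ must equal e'
    have huniq : ∀ e2, 2 ≤ e2 → pyPow b e2 = h_ → e2 = e' := by
      intro e2 h2 hp2
      by_contra hne
      rcases lt_or_gt_of_ne hne with hlt | hgt
      · have := hmin e2 h2 hlt
        omega
      · have := pyPow_exp_lt hb (by omega) hgt
        rw [hp2] at this
        omega
    have hs' : s' = if pe.1 = h_ ∧ 1 ≤ b - 1 ∧ b - 1 ≤ w ∧ pyPow (b - 1) pe.2 = w ∧ i < pe.2
        then (b - 1, pe.2) else (N, i) := rfl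
    have hstep : altLoop h_ w b hb N i = altLoop h_ w (b + 1) (by omega) s'.1 s'.2 := by
      rw [altLoop, dif_pos hbb]
      rfl
    by_cases hc : pe.1 = h_ ∧ 1 ≤ b - 1 ∧ b - 1 ≤ w ∧ pyPow (b - 1) pe.2 = w ∧ i < pe.2
    · have hs'c : s' = (b - 1, pe.2) := by rw [hs', if_pos hc]
      obtain ⟨hc1, hc2, hc3, hc4, hc5⟩ := hc
      have hb1 : pyPow b e' = h_ := by rw [← hc1, hpe']
      have hgood : Good h_ w (b - 1) e' := by
        refine ⟨by omega, hc2, hc3, by rw [show b - 1 + 1 = b by ring]; exact hb1, ?_⟩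
        rw [hpe'] at hc4
        exact hc4
      have hie : i < e' := by rw [hpe'] at hc5; exact hc5
      rw [hs'c, hpe'] at ih
      rcases ih with ⟨N1, e1, hg1, he1, hb1', hi1, hres1, hmax1⟩ | ⟨hno1, hres1⟩
      · left
        refine ⟨N1, e1, hg1, he1, by omega, by omega, by rw [hstep, hs'c, hpe']; exact hres1, ?_⟩
        intro N'' e'' hg'' h2'' hb''
        by_cases hbase : N'' + 1 = b
        · have : e'' = e' := huniq e'' h2'' (by rw [← hbase] at *; exact hg''.2.2.2.1)
          omega
        · exact hmax1 N'' e'' hg'' h2'' (by omega)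
      · left
        refine ⟨b - 1, e', hgood, by omega, by omega, hie,
          by rw [hstep, hs'c, hpe']; exact hres1, ?_⟩
        intro N'' e'' hg'' h2'' hb''
        by_cases hbase : N'' + 1 = b
        · have : e'' = e' := huniq e'' h2'' (by rw [← hbase] at *; exact hg''.2.2.2.1)
          omega
        · exact hno1 N'' e'' hg'' h2'' (by omega)
    · have hs'c : s' = (N, i) := by rw [hs', if_neg hc]
      rw [hs'c] at ih
      -- from the failed guard: any Good at base b has exponent e' ≤ i
      have hbasele : ∀ e'', Good h_ w (b - 1) e'' → 2 ≤ e'' → e'' ≤ i := by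
        intro e'' hg'' h2''
        obtain ⟨_, hN1, hNw, hph, hpw⟩ := hg''
        rw [show b - 1 + 1 = b by ring] at hph
        have heq : e'' = e' := huniq e'' h2'' hph
        subst heq
        by_contra hgt
        exact hc ⟨by rw [hpe']; exact hph, hN1, hNw, by rw [hpe']; exact hpw,
          by rw [hpe']; omega⟩
      rcases ih with ⟨N1, e1, hg1, he1, hb1', hi1, hres1, hmax1⟩ | ⟨hno1, hres1⟩
      · left
        refine ⟨N1, e1, hg1, he1, by omega, hi1, by rw [hstep, hs'c]; exact hres1, ?_⟩
        intro N'' e'' hg'' h2'' hb''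
        by_cases hbase : N'' + 1 = b
        · have : e'' ≤ i := hbasele e'' (by rw [show b - 1 = N'' by omega]; exact hg'') h2''
          omega
        · exact hmax1 N'' e'' hg'' h2'' (by omega)
      · right
        refine ⟨?_, by rw [hstep, hs'c]; exact hres1⟩
        intro N'' e'' hg'' h2'' hb''
        by_cases hbase : N'' + 1 = b
        · exact hbasele e'' (by rw [show b - 1 = N'' by omega]; exact hg'') h2''
        · exact hno1 N'' e'' hg'' h2'' (by omega)
  | case2 b hb N i hbb =>
    right
    constructor
    · intro N' e hg h2 hbN
      obtain ⟨_, hN1, _, hph, _⟩ := hg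
      exfalso
      apply hbb
      have h1 : b * b ≤ (N' + 1) * (N' + 1) := by nlinarith
      have h2' : (N' + 1) * (N' + 1) = pyPow (N' + 1) 2 := by
        unfold pyPow
        rw [show (2:Int).toNat = 2 from rfl, pow_two]
      have h3 : pyPow (N' + 1) 2 ≤ pyPow (N' + 1) e := pyPow_exp_le (by omega) (by norm_num) h2
      rw [hph] at h3
      omega
    · rw [altLoop, dif_neg hbb]

theorem binaryS_alt_best (h_ w : Int) (hpre : 1 ≤ h_) : Best h_ w (binaryS_alt h_ w) := by
  by_cases hbase : h_ = 1 ∧ w = 1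
  · right
    constructor
    · intro N e hg
      obtain ⟨he, hN1, _, hph, _⟩ := hg
      have : pyPow 2 e ≤ pyPow (N + 1) e := pyPow_le_pyPow (by norm_num) (by omega)
      have h2 : (2:Int) ^ (1:Int).toNat ≤ 2 ^ e.toNat := by
        apply pow_le_pow_right₀ (by norm_num)
        omega
      unfold pyPow at *
      rw [hph, hbase.1] at this
      norm_num at h2
      omega
    · rw [if_pos hbase]
      unfold binaryS_alt
      rw [if_pos hbase]
  · -- no-Good-at-exponent-1 characterization
    have hach : binaryS_alt h_ w = altLoop h_ w 2 (by norm_num)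
        (if 1 ≤ w ∧ h_ - 1 = w then ((w:Int), (1:Int)) else (-1, -1)).1
        (if 1 ≤ w ∧ h_ - 1 = w then ((w:Int), (1:Int)) else (-1, -1)).2 := by
      unfold binaryS_alt
      rw [if_neg hbase]
    have hgood1 : ∀ N, Good h_ w N 1 → (1 ≤ w ∧ h_ - 1 = w ∧ N = w) := by
      intro N hg
      obtain ⟨_, hN1, hNw, hph, hpw⟩ := hg
      unfold pyPow at hph hpw
      norm_num at hph hpw
      omega
    have hN1plus : ∀ (N e : Int), Good h_ w N e → 2 ≤ N + 1 := by
      intro N e hg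
      have := hg.2.1
      omega
    by_cases h1 : 1 ≤ w ∧ h_ - 1 = w
    · have hg1 : Good h_ w w 1 := by
        refine ⟨le_refl _, h1.1, le_refl _, ?_, ?_⟩
        · unfold pyPow
          rw [show (1:Int).toNat = 1 from rfl, pow_one]
          omega
        · unfold pyPow
          rw [show (1:Int).toNat = 1 from rfl, pow_one]
      rw [if_pos h1] at hach
      rcases altLoop_spec h_ w 2 (by norm_num) w 1 with
        ⟨N', e, hg, h2e, _, hie, hres, hmax⟩ | ⟨hnone, hres⟩
      · left
        rw [hach, hres]
        refine ⟨hg, ?_⟩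
        intro N'' e'' hg''
        by_cases hc : 2 ≤ e''
        · exact hmax N'' e'' hg'' hc (hN1plus N'' e'' hg'')
        · have := hg''.1
          omega
      · left
        rw [hach, hres]
        refine ⟨hg1, ?_⟩
        intro N'' e'' hg''
        by_cases hc : 2 ≤ e''
        · exact hnone N'' e'' hg'' hc (hN1plus N'' e'' hg'')
        · have := hg''.1
          omega
    · rw [if_neg h1] at hach
      rcases altLoop_spec h_ w 2 (by norm_num) (-1) (-1) with
        ⟨N', e, hg, h2e, _, hie, hres, hmax⟩ | ⟨hnone, hres⟩
      · left
        rw [hach, hres]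
        refine ⟨hg, ?_⟩
        intro N'' e'' hg''
        by_cases hc : 2 ≤ e''
        · exact hmax N'' e'' hg'' hc (hN1plus N'' e'' hg'')
        · have he'' := hg''.1
          have : e'' = 1 := by omega
          exact absurd ⟨(hgood1 N'' (this ▸ hg'')).1, (hgood1 N'' (this ▸ hg'')).2.1⟩ h1
      · right
        constructor
        · intro N'' e'' hg''
          by_cases hc : 2 ≤ e''
          · have := hnone N'' e'' hg'' hc (hN1plus N'' e'' hg'')
            omega
          · have he'' := hg''.1
            have : e'' = 1 := by omega
            exact absurd ⟨(hgood1 N'' (this ▸ hg'')).1, (hgood1 N'' (this ▸ hg'')).2.1⟩ h1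
        · rw [hach, hres, if_neg hbase]

-- ===== VERDICT (by name: the statement is the Claim_ definition above) =====
theorem binaryS_spec : Claim_equal_binaryS := by
  intro h_ w _ hpre
  unfold Spec_binaryS
  exact best_unique (binaryS_best h_ w hpre) (binaryS_alt_best h_ w hpre)

@[simp] theorem binaryS_raises : Claim_raises_binaryS := by
  unfold Claim_raises_binaryS
  refine ⟨by intro h_ w _ hr; unfold Raises_binaryS at hr; unfold Pre_binaryS; omega, by decide, by decide, ?_⟩
  show binaryS_alt 0 5 = (-1, -1)
  unfold binaryS_alt
  rw [altLoop]
  norm_num
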